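-- pv_equiv track=rewrite | github.com/Shivaninaroju/SQLV3 | collabsql/backend/services/premium_nlp_service.py | _find_name_col
-- ===== SOURCE A (Python) =====
-- from typing import List, Dict, Optional
--
-- def _find_name_col(col_names: List[str]) -> Optional[str]:
--     for c in col_names:
--         cl = c.lower()
--         if cl == "first_name" or cl == "name":
--             return c
--     for c in col_names:
--         if "name" in c.lower() or "first" in c.lower():
--             return c
--     return col_names[0] if col_names else None
-- ===== SOURCE B (Python) =====
-- from typing import List, Optional
--
-- def _find_name_col(col_names: List[str]) -> Optional[str]:
--     def _rank(c: str) -> int: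
--         cl = c.lower()
--         if cl == "first_name" or cl == "name":
--             return 0
--         if "name" in cl or "first" in cl:
--             return 1
--         return 2
--     return min(col_names, key=_rank) if col_names else None
-- ===== Notes on version B (the rewrite author's own statement) =====
-- stated objective: alternative
-- what changed: Replaces A's two staged linear scans plus head fallback by a rank function (0 exact, 1 partial, 2 other) and a single stable min(col_names, key=rank), whose first-minimal tie-breaking reproduces A's priority order.
import Mathlib
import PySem

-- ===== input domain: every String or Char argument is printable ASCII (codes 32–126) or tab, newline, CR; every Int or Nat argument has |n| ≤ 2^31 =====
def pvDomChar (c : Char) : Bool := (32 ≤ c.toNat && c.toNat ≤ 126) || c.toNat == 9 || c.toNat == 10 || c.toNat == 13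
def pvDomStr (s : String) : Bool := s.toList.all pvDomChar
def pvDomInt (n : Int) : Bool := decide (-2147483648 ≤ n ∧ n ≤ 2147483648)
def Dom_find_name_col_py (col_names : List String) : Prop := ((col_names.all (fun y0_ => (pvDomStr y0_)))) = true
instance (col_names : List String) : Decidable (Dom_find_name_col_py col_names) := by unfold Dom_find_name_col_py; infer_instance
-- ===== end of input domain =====

-- B replaces A's two staged scans + head fallback by a rank (0 exact, 1 partial, 2 other) and one stable min-by-key; objective: alternative algorithm, same result.

-- ===== PORT A =====
-- first loop: exact match on lowered name
def pyALoop1 : List String → Option String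
  | [] => none
  | c :: rest =>
    let cl := PySem.Str.lower c
    if cl == "first_name" || cl == "name" then some c else pyALoop1 rest

-- second loop: substring match
def pyALoop2 : List String → Option String
  | [] => none
  | c :: rest =>
    if PySem.Str.isIn "name" (PySem.Str.lower c) || PySem.Str.isIn "first" (PySem.Str.lower c)
    then some c else pyALoop2 rest

def find_name_col_py (col_names : List String) : Option String :=
  match pyALoop1 col_names with
  | some c => some c
  | none =>
    match pyALoop2 col_names with
    | some c => some c
    | none =>
      match col_names with
      | [] => none
      | c :: _ => some c

-- ===== PORT B =====
-- _rank: 0 for an exact match, 1 for a partial match, 2 otherwise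
def pyRank (c : String) : Int :=
  let cl := PySem.Str.lower c
  if cl == "first_name" || cl == "name" then 0
  else if PySem.Str.isIn "name" cl || PySem.Str.isIn "first" cl then 1
  else 2

-- min(col_names, key=_rank) if col_names else None
def find_name_col_py_alt (col_names : List String) : Option String :=
  match col_names with
  | [] => none
  | _ => PySem.List.min? col_names pyRank

-- ===== PRECONDITION & SPEC =====
def Spec_find_name_col_py (col_names : List String) (out : Option String) : Prop := out = find_name_col_py_alt col_names
instance (col_names : List String) (out : Option String) : Decidable (Spec_find_name_col_py col_names out) := by unfold Spec_find_name_col_py; infer_instance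

-- ===== CLAIM (what is proved, stated in full; the proofs are below) =====
def Claim_equal_find_name_col_py : Prop := ∀ (col_names : List String), Dom_find_name_col_py col_names → Spec_find_name_col_py col_names (find_name_col_py col_names)

-- ===== LEMMAS AND PROOFS =====

-- the folding step of PySem.List.min? with key pyRank
def pvF : Option String → String → Option String := fun acc x =>
  match acc with
  | none => some x
  | some m => if pyRank x < pyRank m then some x else some m

theorem min?_eq_foldl (xs : List String) : PySem.List.min? xs pyRank = xs.foldl pvF none := by
  unfold PySem.List.min? pvF
  congr 1
  funext acc x
  cases acc <;> rfl

theorem alt_eq_foldl (xs : List String) : find_name_col_py_alt xs = xs.foldl pvF none := by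
  cases xs with
  | nil => rfl
  | cons h t => unfold find_name_col_py_alt; rw [min?_eq_foldl]

theorem pvRankCases (c : String) : pyRank c = 0 ∨ pyRank c = 1 ∨ pyRank c = 2 := by
  unfold pyRank; dsimp only; split_ifs <;> simp

theorem pvRank0 (c : String)
    (h : (PySem.Str.lower c == "first_name" || PySem.Str.lower c == "name") = true) :
    pyRank c = 0 := by
  unfold pyRank; dsimp only; rw [if_pos h]

theorem pvRank1 (c : String)
    (h : ¬ (PySem.Str.lower c == "first_name" || PySem.Str.lower c == "name") = true)
    (h2 : (PySem.Str.isIn "name" (PySem.Str.lower c) || PySem.Str.isIn "first" (PySem.Str.lower c)) = true) :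
    pyRank c = 1 := by
  unfold pyRank; dsimp only; rw [if_neg h, if_pos h2]

theorem pvRank2 (c : String)
    (h : ¬ (PySem.Str.lower c == "first_name" || PySem.Str.lower c == "name") = true)
    (h2 : ¬ (PySem.Str.isIn "name" (PySem.Str.lower c) || PySem.Str.isIn "first" (PySem.Str.lower c)) = true) :
    pyRank c = 2 := by
  unfold pyRank; dsimp only; rw [if_neg h, if_neg h2]

theorem pvRankPos (c : String)
    (h : ¬ (PySem.Str.lower c == "first_name" || PySem.Str.lower c == "name") = true) :
    1 ≤ pyRank c := by
  unfold pyRank; dsimp only; rw [if_neg h]; split_ifs <;> omega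

-- restarting the fold from a seed m compares m with the seedless fold's result
theorem pvL (t : List String) : ∀ m : String,
    t.foldl pvF (some m) =
      match t.foldl pvF none with
      | none => some m
      | some r => if pyRank r < pyRank m then some r else some m := by
  induction t with
  | nil => intro m; rfl
  | cons x t ih =>
    intro m
    have hm : List.foldl pvF (some m) (x :: t) = t.foldl pvF (pvF (some m) x) := rfl
    have hx : List.foldl pvF none (x :: t) = t.foldl pvF (some x) := rfl
    rw [hm, hx, ih x]
    by_cases h : pyRank x < pyRank m
    · have e1 : pvF (some m) x = some x := by simp [pvF, h]
      rw [e1, ih x]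
      cases ht : t.foldl pvF none with
      | none => simp [h]
      | some r =>
        by_cases hr : pyRank r < pyRank x
        · have hrm : pyRank r < pyRank m := by omega
          simp [hr, hrm]
        · simp [hr, h]
    · have e1 : pvF (some m) x = some m := by simp [pvF, h]
      rw [e1, ih m]
      cases ht : t.foldl pvF none with
      | none => simp [h]
      | some r =>
        by_cases hr : pyRank r < pyRank x
        · by_cases hrm : pyRank r < pyRank m <;> simp [hr, hrm]
        · have hrm : ¬ pyRank r < pyRank m := by omega
          simp [hr, hrm, h]

theorem pvLoop1Unfold (c : String) (rest : List String) :
    pyALoop1 (c :: rest) =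
      (if (PySem.Str.lower c == "first_name" || PySem.Str.lower c == "name") = true
       then some c else pyALoop1 rest) := rfl

theorem pvLoop2Unfold (c : String) (rest : List String) :
    pyALoop2 (c :: rest) =
      (if (PySem.Str.isIn "name" (PySem.Str.lower c) || PySem.Str.isIn "first" (PySem.Str.lower c)) = true
       then some c else pyALoop2 rest) := rfl

theorem pvLoop1Some : ∀ {xs : List String} {d : String}, pyALoop1 xs = some d →
    (PySem.Str.lower d == "first_name" || PySem.Str.lower d == "name") = true := by
  intro xs
  induction xs with
  | nil => intro d h; exact absurd h (by simp [pyALoop1])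
  | cons c rest ih =>
    intro d h
    rw [pvLoop1Unfold] at h
    by_cases hc : (PySem.Str.lower c == "first_name" || PySem.Str.lower c == "name") = true
    · rw [if_pos hc] at h; cases h; exact hc
    · rw [if_neg hc] at h; exact ih h

theorem pvLoop1None : ∀ {xs : List String}, pyALoop1 xs = none →
    ∀ x ∈ xs, ¬ (PySem.Str.lower x == "first_name" || PySem.Str.lower x == "name") = true := by
  intro xs
  induction xs with
  | nil => intro _ x hx; exact absurd hx (by simp)
  | cons c rest ih =>
    intro h x hx
    rw [pvLoop1Unfold] at h
    by_cases hc : (PySem.Str.lower c == "first_name" || PySem.Str.lower c == "name") = true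
    · rw [if_pos hc] at h; cases h
    · rw [if_neg hc] at h
      rcases List.mem_cons.mp hx with rfl | hx'
      · exact hc
      · exact ih h x hx'

theorem pvLoop2Some : ∀ {xs : List String} {d : String}, pyALoop2 xs = some d →
    d ∈ xs ∧ (PySem.Str.isIn "name" (PySem.Str.lower d) || PySem.Str.isIn "first" (PySem.Str.lower d)) = true := by
  intro xs
  induction xs with
  | nil => intro d h; exact absurd h (by simp [pyALoop2])
  | cons c rest ih =>
    intro d h
    rw [pvLoop2Unfold] at h
    by_cases hc : (PySem.Str.isIn "name" (PySem.Str.lower c) || PySem.Str.isIn "first" (PySem.Str.lower c)) = true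
    · rw [if_pos hc] at h; cases h; exact ⟨List.mem_cons_self .., hc⟩
    · rw [if_neg hc] at h
      obtain ⟨hm, hp⟩ := ih h
      exact ⟨List.mem_cons_of_mem _ hm, hp⟩

theorem pvLoop2None : ∀ {xs : List String}, pyALoop2 xs = none →
    ∀ x ∈ xs, ¬ (PySem.Str.isIn "name" (PySem.Str.lower x) || PySem.Str.isIn "first" (PySem.Str.lower x)) = true := by
  intro xs
  induction xs with
  | nil => intro _ x hx; exact absurd hx (by simp)
  | cons c rest ih =>
    intro h x hx
    rw [pvLoop2Unfold] at h
    by_cases hc : (PySem.Str.isIn "name" (PySem.Str.lower c) || PySem.Str.isIn "first" (PySem.Str.lower c)) = true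
    · rw [if_pos hc] at h; cases h
    · rw [if_neg hc] at h
      rcases List.mem_cons.mp hx with rfl | hx'
      · exact hc
      · exact ih h x hx'

theorem pvAUnfold (xs : List String) :
    find_name_col_py xs =
      (match pyALoop1 xs with
       | some c => some c
       | none =>
         match pyALoop2 xs with
         | some c => some c
         | none =>
           match xs with
           | [] => none
           | c :: _ => some c) := rfl

theorem main_eq : ∀ cols : List String, find_name_col_py cols = cols.foldl pvF none := by
  intro cols
  induction cols with
  | nil => rfl
  | cons c rest ih =>
    have hcons : List.foldl pvF none (c :: rest) = rest.foldl pvF (some c) := rfl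
    rw [hcons, pvL rest c]
    by_cases hE : (PySem.Str.lower c == "first_name" || PySem.Str.lower c == "name") = true
    · -- exact match at head: A returns c; rank c = 0 so min keeps c
      have hr0 := pvRank0 c hE
      have h1 : pyALoop1 (c :: rest) = some c := by rw [pvLoop1Unfold, if_pos hE]
      have hA : find_name_col_py (c :: rest) = some c := by rw [pvAUnfold, h1]
      rw [hA]
      cases ht : rest.foldl pvF none with
      | none => rfl
      | some r =>
        have hrc := pvRankCases r
        have hnr : ¬ pyRank r < pyRank c := by omega
        simp [hnr]
    · have hcpos := pvRankPos c hE
      have h1c : pyALoop1 (c :: rest) = pyALoop1 rest := by rw [pvLoop1Unfold, if_neg hE]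
      cases hL1 : pyALoop1 rest with
      | some d =>
        -- an exact match in the tail wins over any non-exact head
        have hd0 := pvRank0 d (pvLoop1Some hL1)
        have hA : find_name_col_py (c :: rest) = some d := by rw [pvAUnfold, h1c, hL1]
        have hrest : find_name_col_py rest = some d := by rw [pvAUnfold, hL1]
        have hfold : rest.foldl pvF none = some d := by rw [← ih, hrest]
        rw [hA, hfold]
        have hlt : pyRank d < pyRank c := by omega
        simp [hlt]
      | none =>
        by_cases hP : (PySem.Str.isIn "name" (PySem.Str.lower c) || PySem.Str.isIn "first" (PySem.Str.lower c)) = true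
        · -- head is a partial match (rank 1): A returns c from its second loop
          have hc1 := pvRank1 c hE hP
          have h2 : pyALoop2 (c :: rest) = some c := by rw [pvLoop2Unfold, if_pos hP]
          have hA : find_name_col_py (c :: rest) = some c := by rw [pvAUnfold, h1c, hL1, h2]
          rw [hA]
          cases hL2 : pyALoop2 rest with
          | some d =>
            obtain ⟨hdm, hdp⟩ := pvLoop2Some hL2
            have hd1 := pvRank1 d (pvLoop1None hL1 d hdm) hdp
            have hrest : find_name_col_py rest = some d := by rw [pvAUnfold, hL1, hL2]
            have hfold : rest.foldl pvF none = some d := by rw [← ih, hrest]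
            rw [hfold]
            have hnd : ¬ pyRank d < pyRank c := by omega
            simp [hnd]
          | none =>
            cases rest with
            | nil => rfl
            | cons h t =>
              have hh2 := pvRank2 h (pvLoop1None hL1 h (List.mem_cons_self ..))
                (pvLoop2None hL2 h (List.mem_cons_self ..))
              have hrest : find_name_col_py (h :: t) = some h := by
                rw [pvAUnfold, hL1, hL2]
              have hfold : (h :: t).foldl pvF none = some h := by rw [← ih, hrest]
              rw [hfold]
              have hnh : ¬ pyRank h < pyRank c := by omega
              simp [hnh]
        · -- head rank 2: A falls through to tail's second loop, then the head fallback
          have hc2 := pvRank2 c hE hP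
          have h2c : pyALoop2 (c :: rest) = pyALoop2 rest := by rw [pvLoop2Unfold, if_neg hP]
          cases hL2 : pyALoop2 rest with
          | some d =>
            obtain ⟨hdm, hdp⟩ := pvLoop2Some hL2
            have hd1 := pvRank1 d (pvLoop1None hL1 d hdm) hdp
            have hA : find_name_col_py (c :: rest) = some d := by
              rw [pvAUnfold, h1c, hL1, h2c, hL2]
            have hrest : find_name_col_py rest = some d := by rw [pvAUnfold, hL1, hL2]
            have hfold : rest.foldl pvF none = some d := by rw [← ih, hrest]
            rw [hA, hfold]
            have hlt : pyRank d < pyRank c := by omega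
            simp [hlt]
          | none =>
            have hA : find_name_col_py (c :: rest) = some c := by
              rw [pvAUnfold, h1c, hL1, h2c, hL2]
            rw [hA]
            cases rest with
            | nil => rfl
            | cons h t =>
              have hh2 := pvRank2 h (pvLoop1None hL1 h (List.mem_cons_self ..))
                (pvLoop2None hL2 h (List.mem_cons_self ..))
              have hrest : find_name_col_py (h :: t) = some h := by
                rw [pvAUnfold, hL1, hL2]
              have hfold : (h :: t).foldl pvF none = some h := by rw [← ih, hrest]
              rw [hfold]
              have hnh : ¬ pyRank h < pyRank c := by omega
              simp [hnh]

-- ===== VERDICT (by name: the statement is the Claim_ definition above) =====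
theorem find_name_col_py_spec : Claim_equal_find_name_col_py := by
  intro cols _
  show find_name_col_py cols = find_name_col_py_alt cols
  rw [main_eq, alt_eq_foldl]
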